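-- pv_equiv track=rewrite | github.com/mujtababaluch/labagentscheduler | scheduler.py | time_to_slot
-- ===== SOURCE A (Python) =====
-- SLOT_INFO = {
--     "B": {"label": "09:00–11:00", "hours": [9, 10]},
--     "C": {"label": "11:00–13:00", "hours": [11, 12]},
--     "D": {"label": "13:00–15:00", "hours": [13, 14]},
--     "E": {"label": "15:00–17:00", "hours": [15, 16]},
--     "F": {"label": "17:00–19:00", "hours": [17, 18]},
--     "G": {"label": "19:00–21:00", "hours": [19, 20]},
-- }
--
-- def time_to_slot(time_str: str) -> str | None:
--     """
--     Convert a human-readable time string to a slot letter (B–G).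
--
--     Accepted formats: '9am', '2pm', '14:00', '2:00pm', '9:30 am', etc.
--     Returns None when the string cannot be parsed or maps to no slot.
--     """
--     raw = time_str.lower().strip()
--     hour = None
--
--     if ":" in raw:
--         # HH:MM or HH:MM am/pm
--         numeric = raw.replace("am", "").replace("pm", "").strip()
--         try:
--             h = int(numeric.split(":")[0])
--             if "pm" in raw and h != 12:
--                 h += 12
--             elif "am" in raw and h == 12:
--                 h = 0
--             hour = h
--         except ValueError:
--             return None
--     elif "am" in raw or "pm" in raw:
--         numeric = raw.replace("am", "").replace("pm", "").strip()
--         try: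
--             h = int(numeric)
--             if "pm" in raw and h != 12:
--                 h += 12
--             elif "am" in raw and h == 12:
--                 h = 0
--             hour = h
--         except ValueError:
--             return None
--     else:
--         try:
--             hour = int(raw)
--         except ValueError:
--             return None
--
--     for slot, info in SLOT_INFO.items():
--         if hour in info["hours"]:
--             return slot
--     return None
-- ===== SOURCE B (Python) =====
-- def time_to_slot(time_str: str) -> str | None:
--     raw = time_str.lower().strip()
--     numeric = raw.replace("am", "").replace("pm", "").strip()
--     try:
--         h = int(numeric.split(":")[0] if ":" in raw else numeric)
--     except ValueError:
--         return None
--     if "pm" in raw and h != 12: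
--         h += 12
--     elif "am" in raw and h == 12:
--         h = 0
--     return "BCDEFG"[(h - 9) // 2] if 9 <= h <= 20 else None
-- ===== Notes on version B (the rewrite author's own statement) =====
-- stated objective: simpler
-- what changed: B collapses A's three parse branches into one shared parse (strip am/pm once, optionally take the part before ':') and replaces the loop over the SLOT_INFO dict by a closed-form arithmetic index into 'BCDEFG'.
import Mathlib
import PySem

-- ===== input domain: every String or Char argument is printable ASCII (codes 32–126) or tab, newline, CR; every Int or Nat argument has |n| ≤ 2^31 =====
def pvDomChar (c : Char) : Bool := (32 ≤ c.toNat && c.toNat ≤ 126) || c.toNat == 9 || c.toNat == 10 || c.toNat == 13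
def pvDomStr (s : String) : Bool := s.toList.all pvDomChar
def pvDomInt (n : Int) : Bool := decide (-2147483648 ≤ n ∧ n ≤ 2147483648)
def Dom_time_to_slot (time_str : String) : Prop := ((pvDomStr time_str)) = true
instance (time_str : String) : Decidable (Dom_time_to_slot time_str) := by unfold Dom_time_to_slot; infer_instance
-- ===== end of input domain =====

-- B merges A's three parse branches into a single parse path and replaces the SLOT_INFO
-- dict loop by a closed-form arithmetic index into "BCDEFG" (objective: simpler).


-- ===== PORT A =====
-- SLOT_INFO: each entry is (slot letter, label, hours list)
def SLOT_INFO : List (String × String × List Int) :=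
  [("B", "09:00–11:00", [9, 10]),
   ("C", "11:00–13:00", [11, 12]),
   ("D", "13:00–15:00", [13, 14]),
   ("E", "15:00–17:00", [15, 16]),
   ("F", "17:00–19:00", [17, 18]),
   ("G", "19:00–21:00", [19, 20])]

-- the trailing `for slot, info in SLOT_INFO.items(): if hour in info["hours"]: return slot`
def slotLoopA (hour : Int) : List (String × String × List Int) → Option String
  | [] => none
  | (slot, info) :: rest => if hour ∈ info.2 then some slot else slotLoopA hour rest

-- the meridiem adjustment A performs in its first two branches (same code twice in A)
def adjustA (raw : String) (h : Int) : Int :=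
  if PySem.Str.isIn "pm" raw = true ∧ h ≠ 12 then h + 12
  else if PySem.Str.isIn "am" raw = true ∧ h = 12 then 0
  else h

def time_to_slot (time_str : String) : Option String :=
  let raw := PySem.Str.strip (PySem.Str.lower time_str)
  if PySem.Str.isIn ":" raw then
    let numeric := PySem.Str.strip (PySem.Str.replace (PySem.Str.replace raw "am" "") "pm" "")
    -- numeric.split(":")[0]: split with a nonempty separator always yields a nonempty list,
    -- so Python's [0] never raises; it is the head of the split
    match PySem.Int.ofStr? (((PySem.Str.split? numeric ":").getD []).headD "") with
    | none => none
    | some h => slotLoopA (adjustA raw h) SLOT_INFO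
  else if PySem.Str.isIn "am" raw || PySem.Str.isIn "pm" raw then
    let numeric := PySem.Str.strip (PySem.Str.replace (PySem.Str.replace raw "am" "") "pm" "")
    match PySem.Int.ofStr? numeric with
    | none => none
    | some h => slotLoopA (adjustA raw h) SLOT_INFO
  else
    match PySem.Int.ofStr? raw with
    | none => none
    | some hour => slotLoopA hour SLOT_INFO

-- ===== PORT B =====
def time_to_slot_alt (time_str : String) : Option String :=
  let raw := PySem.Str.strip (PySem.Str.lower time_str)
  let numeric := PySem.Str.strip (PySem.Str.replace (PySem.Str.replace raw "am" "") "pm" "")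
  match PySem.Int.ofStr?
      (if PySem.Str.isIn ":" raw then ((PySem.Str.split? numeric ":").getD []).headD "" else numeric) with
  | none => none
  | some h0 =>
    let h : Int :=
      if PySem.Str.isIn "pm" raw = true ∧ h0 ≠ 12 then h0 + 12
      else if PySem.Str.isIn "am" raw = true ∧ h0 = 12 then 0
      else h0
    -- "BCDEFG"[(h-9)//2]: Python's one-character string result is String.ofList [c]
    if 9 ≤ h ∧ h ≤ 20 then
      (PySem.Str.pyGet? "BCDEFG" (PySem.Int.floordiv (h - 9) 2)).map (fun c => String.ofList [c])
    else none

-- ===== PRECONDITION & SPEC =====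
def Spec_time_to_slot (time_str : String) (out : Option String) : Prop := out = time_to_slot_alt time_str
instance (time_str : String) (out : Option String) : Decidable (Spec_time_to_slot time_str out) := by unfold Spec_time_to_slot; infer_instance

-- ===== CLAIM (what is proved, stated in full; the proofs are below) =====
def Claim_equal_time_to_slot : Prop := ∀ (time_str : String), Dom_time_to_slot time_str → Spec_time_to_slot time_str (time_to_slot time_str)

-- ===== LEMMAS AND PROOFS =====

-- the closed-form lookup agrees with A's loop over SLOT_INFO, for every hour
theorem slotLoopA_closed (h : Int) :
    slotLoopA h SLOT_INFO =
      (if 9 ≤ h ∧ h ≤ 20 then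
        (PySem.Str.pyGet? "BCDEFG" (PySem.Int.floordiv (h - 9) 2)).map (fun c => String.ofList [c])
      else none) := by
  by_cases hb : 9 ≤ h ∧ h ≤ 20
  · obtain ⟨h1, h2⟩ := hb
    interval_cases h <;> decide
  · have e1 : h ∉ ([9, 10] : List Int) := by simp; omega
    have e2 : h ∉ ([11, 12] : List Int) := by simp; omega
    have e3 : h ∉ ([13, 14] : List Int) := by simp; omega
    have e4 : h ∉ ([15, 16] : List Int) := by simp; omega
    have e5 : h ∉ ([17, 18] : List Int) := by simp; omega
    have e6 : h ∉ ([19, 20] : List Int) := by simp; omega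
    rw [if_neg hb]
    simp [slotLoopA, SLOT_INFO, e1, e2, e3, e4, e5, e6]

-- dropWhile is the identity on a prefix of a list it fixes
theorem dropWhile_prefix_eq (p : Char → Bool) :
    ∀ (u v : List Char), List.dropWhile p (u ++ v) = u ++ v → List.dropWhile p u = u := by
  intro u v h
  cases u with
  | nil => simp
  | cons a u' =>
    have hpa : p a = false := by
      by_contra hp
      have hp' : p a = true := by simpa using hp
      simp only [List.cons_append] at h
      rw [List.dropWhile_cons_of_pos hp'] at h
      have hle := List.length_dropWhile_le p (u' ++ v)
      have hlen := congrArg List.length h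
      simp only [List.length_cons, List.length_append] at hle hlen
      omega
    simp [hpa]

-- Python str.strip is idempotent (used for A's third branch, where numeric = raw)
theorem chars_strip_idem (l : List Char) :
    PySem.Chars.strip (PySem.Chars.strip l) = PySem.Chars.strip l := by
  simp only [PySem.Chars.strip, PySem.Chars.lstrip, PySem.Chars.rstrip]
  set p := PySem.Chars.isspace
  set x := List.dropWhile p l with hx
  have hxfix : List.dropWhile p x = x := List.dropWhile_idempotent p l
  -- the inner rstrip result is a prefix of x, so lstrip fixes it
  have hsuf : List.dropWhile p x.reverse <:+ x.reverse := List.dropWhile_suffix p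
  obtain ⟨u, hu⟩ := hsuf
  have hfix2 : List.dropWhile p (List.dropWhile p x.reverse).reverse
      = (List.dropWhile p x.reverse).reverse := by
    apply dropWhile_prefix_eq p (List.dropWhile p x.reverse).reverse u.reverse
    have hrw : (List.dropWhile p x.reverse).reverse ++ u.reverse = x := by
      have := congrArg List.reverse hu
      simpa using this
    rw [hrw]
    exact hxfix
  rw [hfix2, List.reverse_reverse, List.dropWhile_idempotent]

-- str.replace with a pattern that does not occur is the identity
theorem replace_go_no_occ (old new : List Char) :
    ∀ (fuel : Nat) (l acc : List Char), ¬ old <:+: l →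
      PySem.Chars.replace.go old new fuel l acc = acc.reverse ++ l := by
  intro fuel
  induction fuel with
  | zero => intro l acc _; rfl
  | succ n ih =>
    intro l acc hno
    cases l with
    | nil => simp [PySem.Chars.replace.go]
    | cons c t =>
      have hpre : old.isPrefixOf (c :: t) = false := by
        by_contra hp
        have : old <+: c :: t := List.isPrefixOf_iff_prefix.mp (by simpa using hp)
        exact hno this.isInfix
      have hno' : ¬ old <:+: t := fun hin => hno (hin.trans (List.suffix_cons c t).isInfix)
      simp only [PySem.Chars.replace.go, hpre, Bool.false_eq_true, if_false]
      rw [ih t (c :: acc) hno']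
      simp

theorem replace_no_occ (s old new : String) (hne : old.toList ≠ [])
    (h : PySem.Str.isIn old s = false) : PySem.Str.replace s old new = s := by
  have hinf : ¬ old.toList <:+: s.toList := (PySem.Chars.isIn_eq_false_iff _ _).mp (by simpa [PySem.Str.isIn] using h)
  simp only [PySem.Str.replace, PySem.Chars.replace, List.isEmpty_iff, hne, if_false]
  rw [replace_go_no_occ old.toList new.toList s.toList.length s.toList [] hinf]
  simp

-- in the branch with neither "am" nor "pm", A's `raw` equals B's `numeric`
theorem numeric_eq_raw (time_str : String)
    (ham : PySem.Str.isIn "am" (PySem.Str.strip (PySem.Str.lower time_str)) = false)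
    (hpm : PySem.Str.isIn "pm" (PySem.Str.strip (PySem.Str.lower time_str)) = false) :
    PySem.Str.strip (PySem.Str.replace (PySem.Str.replace (PySem.Str.strip (PySem.Str.lower time_str)) "am" "") "pm" "")
      = PySem.Str.strip (PySem.Str.lower time_str) := by
  rw [replace_no_occ _ "am" "" (by decide) ham, replace_no_occ _ "pm" "" (by decide) hpm]
  -- strip (strip (lower s)) = strip (lower s)
  conv_lhs => rw [PySem.Str.strip, PySem.Str.toList_strip, chars_strip_idem]
  rw [PySem.Str.strip]

-- ===== VERDICT (by name: the statement is the Claim_ definition above) =====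
theorem time_to_slot_spec : Claim_equal_time_to_slot := by
  intro s _
  unfold Spec_time_to_slot time_to_slot time_to_slot_alt
  by_cases c1 : PySem.Str.isIn ":" (PySem.Str.strip (PySem.Str.lower s)) = true
  · simp only [c1, if_pos]
    cases PySem.Int.ofStr? (((PySem.Str.split? (PySem.Str.strip (PySem.Str.replace (PySem.Str.replace (PySem.Str.strip (PySem.Str.lower s)) "am" "") "pm" "")) ":").getD []).headD "") with
    | none => rfl
    | some h => exact slotLoopA_closed _
  · have c1' : PySem.Str.isIn ":" (PySem.Str.strip (PySem.Str.lower s)) = false := by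
      simpa using c1
    by_cases c2 : (PySem.Str.isIn "am" (PySem.Str.strip (PySem.Str.lower s)) || PySem.Str.isIn "pm" (PySem.Str.strip (PySem.Str.lower s))) = true
    · simp only [c1', Bool.false_eq_true, if_false, c2, if_true]
      cases PySem.Int.ofStr? (PySem.Str.strip (PySem.Str.replace (PySem.Str.replace (PySem.Str.strip (PySem.Str.lower s)) "am" "") "pm" "")) with
      | none => rfl
      | some h => exact slotLoopA_closed _
    · simp only [Bool.or_eq_true, not_or, Bool.not_eq_true] at c2
      obtain ⟨ham, hpm⟩ := c2
      simp only [c1', Bool.false_eq_true, if_false, ham, hpm, Bool.or_self]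
      rw [numeric_eq_raw s ham hpm]
      cases PySem.Int.ofStr? (PySem.Str.strip (PySem.Str.lower s)) with
      | none => rfl
      | some h =>
        simp only [false_and, if_false]
        exact slotLoopA_closed h
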